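-- pv_equiv track=rewrite | github.com/eoc940/Python-data_structure-and-algorithm_PS | programmers-algorythm/figure/ball_move_simulation.py | solution
-- ===== SOURCE A (Python) =====
-- def move(row, col, queries, n, m):
--     for direct, dist in queries:
--         # 좌로 이동
--         if direct == 0:
--             for _ in range(dist):
--                 if col-1 >= 0:
--                     col -= 1
--         # 우로 이동
--         elif direct == 1:
--             for _ in range(dist):
--                 if col+1 <= m-1:
--                     col += 1
--         # 위로 이동
--         elif direct == 2:
--             for _ in range(dist):
--                 if row-1 >= 0:
--                     row -= 1
--         # 아래로 이동
--         else:
--             for _ in range(dist):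
--                 if row+1 <= n-1:
--                     row += 1
--     return row, col
--
-- def solution(n, m, x, y, queries):
--     answer = 0
--     for i in range(n):
--         for j in range(m):
--             moved_row, moved_col = move(i, j, queries,n,m)
--             if moved_row == x and moved_col == y:
--                 answer += 1
--     return answer
-- ===== SOURCE B (Python) =====
-- def solution(n, m, x, y, queries):
--     # Rows and columns move independently, so count matching start rows and
--     # start columns separately and multiply (O((n+m)*Q) instead of simulating
--     # every cell step by step).
--     def final_row(r):
--         for direct, dist in queries:
--             d = dist if dist > 0 else 0
--             if direct == 2:
--                 r = max(r - d, 0)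
--             elif direct != 0 and direct != 1:
--                 r = min(r + d, n - 1)
--         return r
--
--     def final_col(c):
--         for direct, dist in queries:
--             d = dist if dist > 0 else 0
--             if direct == 0:
--                 c = max(c - d, 0)
--             elif direct == 1:
--                 c = min(c + d, m - 1)
--         return c
--
--     rows = sum(1 for i in range(n) if final_row(i) == x)
--     if rows == 0:
--         return 0
--     cols = sum(1 for j in range(m) if final_col(j) == y)
--     return rows * cols
-- ===== Notes on version B (the rewrite author's own statement) =====
-- stated objective: faster
-- what changed: Row and column positions evolve independently, so B replaces the per-cell per-step clamped simulation by one clamped min/max fold per axis and returns (count of matching start rows) * (count of matching start columns).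
import Mathlib
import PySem

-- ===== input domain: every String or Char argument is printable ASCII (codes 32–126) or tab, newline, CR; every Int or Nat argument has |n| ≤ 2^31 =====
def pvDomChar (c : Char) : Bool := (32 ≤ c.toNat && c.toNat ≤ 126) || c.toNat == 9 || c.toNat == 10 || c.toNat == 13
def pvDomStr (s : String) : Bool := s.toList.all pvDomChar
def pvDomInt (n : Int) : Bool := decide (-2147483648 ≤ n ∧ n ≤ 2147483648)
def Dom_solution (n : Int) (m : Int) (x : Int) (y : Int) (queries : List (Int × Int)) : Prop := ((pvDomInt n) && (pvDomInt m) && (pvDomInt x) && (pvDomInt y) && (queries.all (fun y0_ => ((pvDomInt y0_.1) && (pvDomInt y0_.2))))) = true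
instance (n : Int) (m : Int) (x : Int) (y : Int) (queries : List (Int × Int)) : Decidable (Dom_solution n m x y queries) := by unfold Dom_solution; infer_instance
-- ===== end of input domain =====

-- B replaces the per-cell, per-step simulation by independent per-axis clamp
-- arithmetic and multiplies the row and column match counts (objective: faster).

-- ===== PORT A =====
def moveA (row col : Int) (queries : List (Int × Int)) (n m : Int) : Int × Int :=
  queries.foldl (fun rc q =>
    if q.1 = 0 then
      (rc.1, (PySem.List.pyRange 0 q.2 1).foldl (fun c _ => if c - 1 ≥ 0 then c - 1 else c) rc.2)
    else if q.1 = 1 then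
      (rc.1, (PySem.List.pyRange 0 q.2 1).foldl (fun c _ => if c + 1 ≤ m - 1 then c + 1 else c) rc.2)
    else if q.1 = 2 then
      ((PySem.List.pyRange 0 q.2 1).foldl (fun r _ => if r - 1 ≥ 0 then r - 1 else r) rc.1, rc.2)
    else
      ((PySem.List.pyRange 0 q.2 1).foldl (fun r _ => if r + 1 ≤ n - 1 then r + 1 else r) rc.1, rc.2))
    (row, col)

def solution (n : Int) (m : Int) (x : Int) (y : Int) (queries : List (Int × Int)) : Int :=
  (PySem.List.pyRange 0 n 1).foldl (fun answer i =>
    (PySem.List.pyRange 0 m 1).foldl (fun answer j =>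
      let mv := moveA i j queries n m
      if mv.1 = x ∧ mv.2 = y then answer + 1 else answer) answer) 0

-- ===== PORT B =====
def finalRow (queries : List (Int × Int)) (n : Int) (r : Int) : Int :=
  queries.foldl (fun r q =>
    let d := if q.2 > 0 then q.2 else 0
    if q.1 = 2 then max (r - d) 0
    else if q.1 ≠ 0 ∧ q.1 ≠ 1 then min (r + d) (n - 1)
    else r) r

def finalCol (queries : List (Int × Int)) (m : Int) (c : Int) : Int :=
  queries.foldl (fun c q =>
    let d := if q.2 > 0 then q.2 else 0
    if q.1 = 0 then max (c - d) 0
    else if q.1 = 1 then min (c + d) (m - 1)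
    else c) c

def solution_alt (n : Int) (m : Int) (x : Int) (y : Int) (queries : List (Int × Int)) : Int :=
  let rows := (PySem.List.pyRange 0 n 1).foldl (fun a i => if finalRow queries n i = x then a + 1 else a) 0
  if rows = 0 then 0
  else
    let cols := (PySem.List.pyRange 0 m 1).foldl (fun a j => if finalCol queries m j = y then a + 1 else a) 0
    rows * cols

-- ===== PRECONDITION & SPEC =====
def Spec_solution (n : Int) (m : Int) (x : Int) (y : Int) (queries : List (Int × Int)) (out : Int) : Prop := out = solution_alt n m x y queries
instance (n : Int) (m : Int) (x : Int) (y : Int) (queries : List (Int × Int)) (out : Int) : Decidable (Spec_solution n m x y queries out) := by unfold Spec_solution; infer_instance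

-- ===== CLAIM (what is proved, stated in full; the proofs are below) =====
def Claim_equal_solution : Prop := ∀ (n : Int) (m : Int) (x : Int) (y : Int) (queries : List (Int × Int)), Dom_solution n m x y queries → Spec_solution n m x y queries (solution n m x y queries)

-- ===== LEMMAS AND PROOFS =====

-- step-by-step decrement with a floor at 0 is a clamped subtraction
lemma decFold (l : List Int) : ∀ c : Int, 0 ≤ c →
    l.foldl (fun c _ => if c - 1 ≥ 0 then c - 1 else c) c = max (c - l.length) 0 := by
  induction l with
  | nil => intro c hc; simp; omega
  | cons a l ih =>
    intro c hc
    simp only [List.foldl_cons, List.length_cons]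
    by_cases h : c - 1 ≥ 0
    · rw [if_pos h, ih _ (by omega)]; omega
    · rw [if_neg h, ih _ hc]; omega

-- step-by-step increment with a cap is a clamped addition
lemma incFold (b : Int) (l : List Int) : ∀ c : Int, c ≤ b →
    l.foldl (fun c _ => if c + 1 ≤ b then c + 1 else c) c = min (c + l.length) b := by
  induction l with
  | nil => intro c hc; simp; omega
  | cons a l ih =>
    intro c hc
    simp only [List.foldl_cons, List.length_cons]
    by_cases h : c + 1 ≤ b
    · rw [if_pos h, ih _ h]; omega
    · rw [if_neg h, ih _ hc]; omega

-- the simulated move decomposes into the two per-axis clamp folds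
lemma move_decomp (queries : List (Int × Int)) : ∀ (n m r c : Int),
    0 ≤ r → r ≤ n - 1 → 0 ≤ c → c ≤ m - 1 →
    moveA r c queries n m = (finalRow queries n r, finalCol queries m c) := by
  induction queries with
  | nil => intro n m r c _ _ _ _; rfl
  | cons q qs ih =>
    intro n m r c hr hrn hc hcm
    simp only [moveA, finalRow, finalCol, List.foldl_cons] at *
    have hlen : ((PySem.List.pyRange 0 q.2 1).length : Int) = if q.2 > 0 then q.2 else 0 := by
      rw [PySem.List.length_pyRange_one]; omega
    by_cases h0 : q.1 = 0
    · rw [if_pos h0]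
      rw [decFold _ _ hc, hlen]
      have := ih n m r (max (c - (if q.2 > 0 then q.2 else 0)) 0) hr hrn (by omega) (by omega)
      simpa [moveA, finalRow, finalCol, h0] using this
    · by_cases h1 : q.1 = 1
      · rw [if_neg h0, if_pos h1]
        rw [incFold _ _ _ hcm, hlen]
        have := ih n m r (min (c + (if q.2 > 0 then q.2 else 0)) (m - 1)) hr hrn (by omega) (by omega)
        simpa [moveA, finalRow, finalCol, h0, h1] using this
      · by_cases h2 : q.1 = 2
        · rw [if_neg h0, if_neg h1, if_pos h2]
          rw [decFold _ _ hr, hlen]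
          have := ih n m (max (r - (if q.2 > 0 then q.2 else 0)) 0) c (by omega) (by omega) hc hcm
          simpa [moveA, finalRow, finalCol, h0, h1, h2] using this
        · rw [if_neg h0, if_neg h1, if_neg h2]
          rw [incFold _ _ _ hrn, hlen]
          have := ih n m (min (r + (if q.2 > 0 then q.2 else 0)) (n - 1)) c (by omega) (by omega) hc hcm
          simpa [moveA, finalRow, finalCol, h0, h1, h2] using this

-- counting a conjunction with a fixed left conjunct
lemma countP_and (l : List Int) (b : Prop) [Decidable b] (p : Int → Prop) [DecidablePred p] :
    l.countP (fun j => decide (b ∧ p j)) = if b then l.countP (fun j => decide (p j)) else 0 := by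
  by_cases hb : b <;> simp [hb]

lemma sum_map_ite_const (l : List Int) (q : Int → Prop) [DecidablePred q] (C : Int) :
    (l.map (fun i => if q i then C else 0)).sum = (l.countP (fun i => decide (q i)) : Int) * C := by
  induction l with
  | nil => simp
  | cons a l ih =>
    simp only [List.map_cons, List.sum_cons, List.countP_cons, ih]
    by_cases h : q a
    · simp [h]; ring
    · simp [h]

theorem solution_eq (n m x y : Int) (queries : List (Int × Int)) :
    solution n m x y queries = solution_alt n m x y queries := by
  unfold solution solution_alt
  rw [PySem.List.foldl_congr_mem (g := fun answer i =>
        answer + if finalRow queries n i = x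
          then ((PySem.List.pyRange 0 m 1).countP (fun j => decide (finalCol queries m j = y)) : Int)
          else 0)]
  · rw [PySem.List.foldl_add]
    rw [sum_map_ite_const]
    rw [PySem.List.foldl_ite_add_one, PySem.List.foldl_ite_add_one]
    simp only [zero_add]
    split_ifs with h <;> simp [h]
  · intro acc i hi
    rw [PySem.List.mem_pyRange_one] at hi
    rw [PySem.List.foldl_congr_mem (g := fun answer j =>
          if finalRow queries n i = x ∧ finalCol queries m j = y then answer + 1 else answer)]
    · rw [PySem.List.foldl_ite_add_one, countP_and]
      split_ifs <;> simp
    · intro acc2 j hj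
      rw [PySem.List.mem_pyRange_one] at hj
      simp only [move_decomp queries n m i j (by omega) (by omega) (by omega) (by omega)]

-- ===== VERDICT (by name: the statement is the Claim_ definition above) =====
theorem solution_spec : Claim_equal_solution := by
  intro n m x y queries _
  exact solution_eq n m x y queries
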